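-- pv_equiv track=rewrite | github.com/jakobkhansen/master-thesis | sem3/suffixarraycoding/linearpython/suffixarray.py | get_bucket_pointers
-- ===== SOURCE A (Python) =====
-- def get_bucket_pointers(string):
--     buckets = {}
--     for c in string:
--         buckets[c] = buckets.get(c, 0) + 1
--     pointers = [0]*len(buckets.keys())
--     sorted_chars = sorted(buckets.keys())
--     for i,c in enumerate(sorted_chars):
--         if i == len(sorted_chars)-1:
--             break
--         pointers[i+1] = pointers[i] + buckets[c]
--
--
--     # Get end pointers
--     pointers_end = []
--     for p in pointers[1:]:
--         pointers_end.append(p-1)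
--     pointers_end.append(len(string)-1)
--
--     sorted_char_mapping = {sorted_chars[i]: i for i in range(len(sorted_chars))}
--
--
--     return pointers, pointers_end, sorted_char_mapping
-- ===== SOURCE B (Python) =====
-- def get_bucket_pointers(string):
--     chars = sorted(set(string))
--     # bucket start of c = number of characters strictly smaller than c
--     pointers = [sum(x < c for x in string) for c in chars]
--     pointers_end = [p - 1 for p in pointers[1:]]
--     pointers_end.append(len(string) - 1)
--     sorted_char_mapping = {c: i for i, c in enumerate(chars)}
--     return pointers, pointers_end, sorted_char_mapping
-- ===== Notes on version B (the rewrite author's own statement) =====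
-- stated objective: simpler
-- what changed: B replaces A's count-dict plus in-place prefix-sum pointer loop by the closed form 'start of bucket c = number of characters strictly smaller than c' computed per distinct character of sorted(set(string)), with the end pointers and mapping as one comprehension each.
import Mathlib
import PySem

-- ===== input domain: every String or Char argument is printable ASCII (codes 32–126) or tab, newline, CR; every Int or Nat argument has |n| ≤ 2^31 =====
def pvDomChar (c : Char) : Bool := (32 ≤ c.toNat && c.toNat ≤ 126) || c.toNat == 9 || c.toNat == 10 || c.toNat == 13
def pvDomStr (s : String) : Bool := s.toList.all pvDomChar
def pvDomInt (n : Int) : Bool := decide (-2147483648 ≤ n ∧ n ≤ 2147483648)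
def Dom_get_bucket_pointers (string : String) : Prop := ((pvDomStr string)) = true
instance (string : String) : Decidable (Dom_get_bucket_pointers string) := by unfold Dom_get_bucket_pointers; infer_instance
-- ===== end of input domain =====

-- B replaces A's count-dict + in-place prefix-sum loop by the closed form
-- "start of bucket c = number of characters strictly smaller than c" (objective: simpler).

-- ===== PORT A =====
-- 1-char Python strings are modelled as Char (exact: sorting/equality of 1-char
-- strings coincides with Char order); they become String keys in the returned mapping.
def get_bucket_pointers (string : String) : List Int × List Int × (List (String × Int)) :=
  let buckets : PySem.Dict Char Int :=
    string.toList.foldl (fun d c => d.insert c (d.getD c 0 + 1)) PySem.Dict.empty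
  let pointers : List Int := List.replicate buckets.keys.length 0
  let sorted_chars : List Char := PySem.List.sorted buckets.keys (fun x => x) false
  -- the 'break' fires only on the final iteration 'i = len-1', so the fold is exact;
  -- indices i, i+1 are in range and c is a key of buckets, so pyGetD/pySetD/getD are exact
  let pointers : List Int :=
    (PySem.List.enumerate sorted_chars 0).foldl
      (fun ptrs p =>
        if p.1 = (sorted_chars.length : Int) - 1 then ptrs
        else PySem.List.pySetD ptrs (p.1 + 1) (PySem.List.pyGetD ptrs p.1 0 + buckets.getD p.2 0))
      pointers
  let pointers_end : List Int :=
    (PySem.List.slice pointers (some 1) none).foldl (fun acc p => acc ++ [p - 1]) []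
  let pointers_end : List Int := pointers_end ++ [(string.toList.length : Int) - 1]
  let sorted_char_mapping : PySem.Dict String Int :=
    (PySem.List.pyRange 0 (sorted_chars.length : Int) 1).foldl
      (fun d i => d.insert (String.ofList [PySem.List.pyGetD sorted_chars i 'A']) i)
      PySem.Dict.empty
  (pointers, pointers_end, sorted_char_mapping.items)

-- ===== PORT B =====
def get_bucket_pointers_alt (string : String) : List Int × List Int × (List (String × Int)) :=
  let chars : List Char := PySem.List.sorted (PySem.Set.ofList string.toList) (fun x => x) false
  let pointers : List Int :=
    chars.map (fun c => (string.toList.map (fun x => if x < c then (1 : Int) else 0)).sum)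
  let pointers_end : List Int := (PySem.List.slice pointers (some 1) none).map (fun p => p - 1)
  let pointers_end : List Int := pointers_end ++ [(string.toList.length : Int) - 1]
  let sorted_char_mapping : PySem.Dict String Int :=
    (PySem.List.enumerate chars 0).foldl (fun d p => d.insert (String.ofList [p.2]) p.1)
      PySem.Dict.empty
  (pointers, pointers_end, sorted_char_mapping.items)

-- ===== PRECONDITION & SPEC =====
def Spec_get_bucket_pointers (string : String) (out : List Int × List Int × (List (String × Int))) : Prop := out = get_bucket_pointers_alt string
instance (string : String) (out : List Int × List Int × (List (String × Int))) : Decidable (Spec_get_bucket_pointers string out) := by unfold Spec_get_bucket_pointers; infer_instance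

-- ===== CLAIM (what is proved, stated in full; the proofs are below) =====
def Claim_equal_get_bucket_pointers : Prop := ∀ (string : String), Dom_get_bucket_pointers string → Spec_get_bucket_pointers string (get_bucket_pointers string)

-- ===== LEMMAS AND PROOFS =====

lemma pvCountP_or_count (xs : List Char) (q : Char → Bool) (a : Char) (ha : q a = false) :
    xs.countP (fun x => q x || x == a) = xs.countP q + List.count a xs := by
  induction xs with
  | nil => simp
  | cons x t ih =>
    by_cases hx : x = a
    · subst hx; simp [ha, ih]; omega
    · simp [List.countP_cons, hx, ih]
      cases hq : q x <;> simp <;> omega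

lemma pvLt_getElem_iff (ks : List Char) (hp : ks.Pairwise (· < ·)) {m n : Nat}
    (hm : m < ks.length) (hn : n < ks.length) : ks[m] < ks[n] ↔ m < n := by
  rw [List.pairwise_iff_getElem] at hp
  constructor
  · intro h; by_contra hc; push_neg at hc
    rcases Nat.lt_or_ge n m with h2 | h2
    · exact absurd ((hp n m hn hm h2).trans h) (lt_irrefl _)
    · have : n = m := Nat.le_antisymm hc h2
      subst this; exact lt_irrefl _ h
  · exact fun h => hp m n hm hn h

lemma pvLoop (ks : List Char) (cnt N : Char → Int)
    (R2 : ∀ j : Nat, (h : j + 1 < ks.length) →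
      N (ks[j + 1]) = N (ks[j]'(Nat.lt_of_succ_lt h)) + cnt (ks[j]'(Nat.lt_of_succ_lt h))) :
    ∀ (i : Nat) (ptrs : List Int),
      ptrs.length = ks.length →
      (∀ j : Nat, (hj : j < ks.length) → ptrs.getD j 0 = if j ≤ i then N (ks[j]) else 0) →
      (PySem.List.enumerate (ks.drop i) (i : Int)).foldl
        (fun ptrs p =>
          if p.1 = (ks.length : Int) - 1 then ptrs
          else PySem.List.pySetD ptrs (p.1 + 1) (PySem.List.pyGetD ptrs p.1 0 + cnt p.2))
        ptrs
      = ks.map N := by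
  intro i ptrs hlen hinv
  induction hd : ks.drop i generalizing i ptrs with
  | nil =>
    have hi : ks.length ≤ i := List.drop_eq_nil_iff.mp hd
    simp only [PySem.List.enumerate_nil, List.foldl_nil]
    apply List.ext_getElem (by simp [hlen])
    intro j hj1 hj2
    have hjk : j < ks.length := by simpa [hlen] using hj1
    have := hinv j hjk
    rw [List.getD_eq_getElem ptrs 0 hj1] at this
    simp [this, Nat.le_trans (Nat.le_of_lt hjk) hi]
  | cons c t ih =>
    have hi : i < ks.length := by
      by_contra hc
      rw [List.drop_eq_nil_iff.mpr (by omega)] at hd; simp at hd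
    have hdc := List.drop_eq_getElem_cons hi
    rw [hd] at hdc
    obtain ⟨hc, ht⟩ : c = ks[i] ∧ t = ks.drop (i + 1) := by
      exact ⟨(List.cons.injEq _ _ _ _ ▸ hdc).1, (List.cons.injEq _ _ _ _ ▸ hdc).2⟩
    rw [PySem.List.enumerate_cons, List.foldl_cons]
    by_cases hlast : (i : Int) = (ks.length : Int) - 1
    · have hil : i = ks.length - 1 := by omega
      have ht0 : t = [] := by rw [ht, List.drop_eq_nil_iff]; omega
      rw [if_pos hlast, ht0]
      simp only [PySem.List.enumerate_nil, List.foldl_nil]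
      apply List.ext_getElem (by simp [hlen])
      intro j hj1 hj2
      have hjk : j < ks.length := by simpa [hlen] using hj1
      have := hinv j hjk
      rw [List.getD_eq_getElem ptrs 0 hj1] at this
      rw [this, if_pos (show j ≤ i by omega)]
      simp
    · have hi1 : i + 1 < ks.length := by omega
      rw [if_neg hlast]
      have hcast : (i : Int) + 1 = ((i + 1 : Nat) : Int) := by push_cast; ring
      rw [hcast, PySem.List.pySetD_natCast, PySem.List.pyGetD_natCast]
      have hval : ptrs.getD i 0 + cnt c = N (ks[i + 1]) := by
        rw [hinv i (by omega), if_pos (le_refl i), hc, R2 i hi1]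
      rw [hval]
      refine ih (i + 1) (ptrs.set (i + 1) (N ks[i + 1])) ?_ ?_ ht.symm
      · simp [hlen]
      · intro j hj
        have hjp : j < (ptrs.set (i + 1) (N ks[i + 1])).length := by simp [hlen]; omega
        rw [List.getD_eq_getElem _ 0 hjp, List.getElem_set]
        by_cases hji : i + 1 = j
        · subst hji; simp
        · rw [if_neg hji]
          have := hinv j hj
          rw [List.getD_eq_getElem ptrs 0 (by omega : j < ptrs.length)] at this
          rw [this]
          by_cases hj1 : j ≤ i
          · rw [if_pos hj1, if_pos (by omega)]
          · rw [if_neg hj1, if_neg (by omega)]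

lemma pvKs_pairwise (xs : List Char) :
    (PySem.List.sorted (PySem.Set.ofList xs) (fun x => x) false).Pairwise (· < ·) :=
  PySem.List.sorted_ofList_pairwise_lt xs

lemma pvMem_ks (xs : List Char) (x : Char) :
    x ∈ xs ↔ x ∈ PySem.List.sorted (PySem.Set.ofList xs) (fun x => x) false := by
  rw [PySem.List.mem_sorted, PySem.Set.mem_ofList]

lemma pvR2' (xs ks : List Char) (hp : ks.Pairwise (· < ·)) (hmem : ∀ x ∈ xs, x ∈ ks)
    (j : Nat) (h : j + 1 < ks.length) :
    xs.countP (fun x => decide (x < ks[j + 1]))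
      = xs.countP (fun x => decide (x < ks[j]'(Nat.lt_of_succ_lt h)))
        + List.count (ks[j]'(Nat.lt_of_succ_lt h)) xs := by
  have hj : j < ks.length := Nat.lt_of_succ_lt h
  have hcong : xs.countP (fun x => decide (x < ks[j + 1]))
      = xs.countP (fun x => decide (x < ks[j]) || x == ks[j]) := by
    apply List.countP_congr
    intro x hx
    obtain ⟨m, hm, hxm⟩ := List.mem_iff_getElem.mp (hmem x hx)
    subst hxm
    simp only [decide_eq_true_eq, Bool.or_eq_true, beq_iff_eq]
    rw [pvLt_getElem_iff ks hp hm h, pvLt_getElem_iff ks hp hm hj]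
    constructor
    · intro hlt
      rcases Nat.lt_or_ge m j with h2 | h2
      · exact Or.inl h2
      · refine Or.inr ?_
        have hmj : m = j := by omega
        subst hmj; rfl
    · rintro (h2 | h2)
      · omega
      · have hmj : m = j := by
          by_contra hne
          rcases Nat.lt_or_ge m j with h3 | h3
          · exact absurd h2 (ne_of_lt ((pvLt_getElem_iff ks hp hm hj).mpr h3))
          · exact absurd h2.symm (ne_of_lt ((pvLt_getElem_iff ks hp hj hm).mpr (by omega)))
        omega
  rw [hcong, pvCountP_or_count xs _ ks[j] (by simp)]

lemma pvR1' (xs ks : List Char) (hp : ks.Pairwise (· < ·)) (hmem : ∀ x ∈ xs, x ∈ ks)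
    (h : 0 < ks.length) :
    xs.countP (fun x => decide (x < ks[0])) = 0 := by
  rw [List.countP_eq_zero]
  intro x hx
  obtain ⟨m, hm, hxm⟩ := List.mem_iff_getElem.mp (hmem x hx)
  subst hxm
  simp only [decide_eq_true_eq]
  intro hlt
  exact absurd ((pvLt_getElem_iff ks hp hm h).mp hlt) (by omega)

lemma pvSumIte (xs : List Char) (c : Char) :
    (xs.map (fun x => if x < c then (1 : Int) else 0)).sum
      = ((xs.countP (fun x => decide (x < c)) : Nat) : Int) := by
  rw [← PySem.List.sum_map_ite_one_zero (fun x => decide (x < c)) xs]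
  congr 1
  simp

lemma pvPointers (xs : List Char) :
    (PySem.List.enumerate (PySem.List.sorted (PySem.Set.ofList xs) (fun x => x) false) 0).foldl
      (fun ptrs p =>
        if p.1 = ((PySem.List.sorted (PySem.Set.ofList xs) (fun x => x) false).length : Int) - 1 then ptrs
        else PySem.List.pySetD ptrs (p.1 + 1) (PySem.List.pyGetD ptrs p.1 0 + (List.count p.2 xs : Int)))
      (List.replicate (PySem.List.sorted (PySem.Set.ofList xs) (fun x => x) false).length 0)
    = (PySem.List.sorted (PySem.Set.ofList xs) (fun x => x) false).map
        (fun c => ((xs.countP (fun x => decide (x < c)) : Nat) : Int)) := by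
  have hp := pvKs_pairwise xs
  have hmem : ∀ x ∈ xs, x ∈ PySem.List.sorted (PySem.Set.ofList xs) (fun x => x) false :=
    fun x hx => (pvMem_ks xs x).mp hx
  have h0 := pvLoop (PySem.List.sorted (PySem.Set.ofList xs) (fun x => x) false)
      (fun c => (List.count c xs : Int))
      (fun c => ((xs.countP (fun x => decide (x < c)) : Nat) : Int))
      (fun j h => by
        have := pvR2' xs _ hp hmem j h
        simp only []
        omega) 0
      (List.replicate (PySem.List.sorted (PySem.Set.ofList xs) (fun x => x) false).length 0)
      (by simp)
      (by
        intro j hj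
        rw [List.getD_replicate _ hj]
        by_cases hj0 : j = 0
        · subst hj0
          have h1 := pvR1' xs _ hp hmem (by omega)
          simp [h1]
        · rw [if_neg (by omega)])
  simpa using h0


-- ===== VERDICT (by name: the statement is the Claim_ definition above) =====
theorem get_bucket_pointers_spec : Claim_equal_get_bucket_pointers := by
  intro s _
  unfold Spec_get_bucket_pointers get_bucket_pointers get_bucket_pointers_alt
  simp only [PySem.Dict.foldl_insert_getD_add_one_eq_counter, PySem.Dict.keys_counter,
    PySem.Dict.getD_counter, PySem.List.foldl_append_singleton_eq_map, List.nil_append]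
  rw [← PySem.List.length_sorted (PySem.Set.ofList s.toList) (fun x => x) false]
  rw [pvPointers s.toList]
  simp only [pvSumIte]
  rw [PySem.List.enumerate_eq_map_pyRange (PySem.List.sorted (PySem.Set.ofList s.toList) (fun x => x) false) 'A',
    List.foldl_map]
  simp [PySem.List.len]
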